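-- pv_equiv track=rewrite | github.com/Aashrith-Vellampalli/MachineTranslation-Ger--en- | utils/greedy_transformer.py | ids_to_tokens
-- ===== SOURCE A (Python) =====
-- def ids_to_tokens(ids, itos):
--     words = []
--     for idx in ids:
--         tok = itos.get(idx, "<unk>")
--         if tok == "<eos>":
--             break
--         if tok != "<sos>":
--             words.append(tok)
--     return words
-- ===== SOURCE B (Python) =====
-- def ids_to_tokens(ids, itos):
--     toks = [itos.get(idx, "<unk>") for idx in ids]
--     cut = toks.index("<eos>") if "<eos>" in toks else len(toks)
--     return [t for t in toks[:cut] if t != "<sos>"]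
-- ===== Notes on version B (the rewrite author's own statement) =====
-- stated objective: idiomatic
-- what changed: B replaces A's single fused loop with break by three separate stages: map all ids to tokens, cut the list at the first <eos> found via index, then filter out <sos> with a comprehension.
import Mathlib
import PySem

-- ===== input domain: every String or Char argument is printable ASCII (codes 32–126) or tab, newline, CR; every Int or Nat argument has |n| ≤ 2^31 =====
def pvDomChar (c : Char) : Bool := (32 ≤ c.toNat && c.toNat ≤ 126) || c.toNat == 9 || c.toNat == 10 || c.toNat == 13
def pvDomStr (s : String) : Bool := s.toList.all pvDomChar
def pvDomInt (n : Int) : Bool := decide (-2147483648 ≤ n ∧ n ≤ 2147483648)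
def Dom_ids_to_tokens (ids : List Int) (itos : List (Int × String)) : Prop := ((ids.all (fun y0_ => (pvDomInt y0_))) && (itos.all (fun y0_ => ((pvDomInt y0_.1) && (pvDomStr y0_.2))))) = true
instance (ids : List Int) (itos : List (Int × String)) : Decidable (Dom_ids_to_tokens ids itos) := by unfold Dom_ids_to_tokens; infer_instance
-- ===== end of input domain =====

-- B maps all ids to tokens, cuts at the first "<eos>" via index, then filters "<sos>" (idiomatic pipeline, same O(n) cost).
-- ===== PORT A =====
-- A's for-loop with break, as structural recursion over ids carrying the accumulated words.
def goA (words : List String) (ids : List Int) (itos : List (Int × String)) : List String :=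
  match ids with
  | [] => words
  | idx :: rest =>
    let tok := PySem.Dict.getD (PySem.Dict.mk itos) idx "<unk>"
    if tok = "<eos>" then words
    else goA (if tok ≠ "<sos>" then words ++ [tok] else words) rest itos

def ids_to_tokens (ids : List Int) (itos : List (Int × String)) : List String :=
  goA [] ids itos

-- ===== PORT B =====
def ids_to_tokens_alt (ids : List Int) (itos : List (Int × String)) : List String :=
  let toks := ids.map (fun idx => PySem.Dict.getD (PySem.Dict.mk itos) idx "<unk>")
  let cut := if toks.contains "<eos>" then (PySem.List.index? toks "<eos>").getD 0 else toks.length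
  (toks.take cut).filter (fun t => t ≠ "<sos>")

-- ===== PRECONDITION & SPEC =====
def Spec_ids_to_tokens (ids : List Int) (itos : List (Int × String)) (out : List String) : Prop := out = ids_to_tokens_alt ids itos
instance (ids : List Int) (itos : List (Int × String)) (out : List String) : Decidable (Spec_ids_to_tokens ids itos out) := by unfold Spec_ids_to_tokens; infer_instance

-- ===== CLAIM (what is proved, stated in full; the proofs are below) =====
def Claim_equal_ids_to_tokens : Prop := ∀ (ids : List Int) (itos : List (Int × String)), Dom_ids_to_tokens ids itos → Spec_ids_to_tokens ids itos (ids_to_tokens ids itos)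

-- ===== LEMMAS AND PROOFS =====

-- B's pipeline satisfies A's loop recursion.
theorem alt_nil (itos : List (Int × String)) : ids_to_tokens_alt [] itos = [] := rfl

theorem cutfilter_cons (tok : String) (toks : List String) :
    ((((tok :: toks).take
        (if (tok :: toks).contains "<eos>" then (PySem.List.index? (tok :: toks) "<eos>").getD 0
         else (tok :: toks).length))).filter (fun t => t ≠ "<sos>")) =
      (if tok = "<eos>" then []
       else (if tok ≠ "<sos>" then [tok] else []) ++
         ((toks.take
            (if toks.contains "<eos>" then (PySem.List.index? toks "<eos>").getD 0
             else toks.length)).filter (fun t => t ≠ "<sos>"))) := by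
  rw [PySem.List.index?_eq_idxOf?, PySem.List.index?_eq_idxOf?]
  by_cases heos : tok = "<eos>"
  · subst heos
    simp [List.idxOf?_cons]
  · have hbe : (tok == "<eos>") = false := by simp [heos]
    simp only [List.contains_cons, hbe, List.idxOf?_cons, heos, if_false,
      List.length_cons]
    have heos' : "<eos>" ≠ tok := Ne.symm heos
    rcases hk : List.idxOf? "<eos>" toks with _ | k
    · have hm : toks.contains "<eos>" = false := by
        simp [List.idxOf?_eq_none_iff.mp hk]
      simp only [hm, Bool.false_eq_true, if_false, Option.map_none, Option.getD_none,
        List.take_length]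
      by_cases hsos : tok = "<sos>" <;> simp [hsos, heos']
    · have hm : toks.contains "<eos>" = true := by
        by_contra hmem
        rw [List.idxOf?_eq_none_iff.mpr (by simpa using hmem)] at hk
        simp at hk
      simp only [hm, if_true, Option.map_some, Option.getD_some]
      by_cases hsos : tok = "<sos>" <;> simp [hsos]
theorem alt_cons (idx : Int) (rest : List Int) (itos : List (Int × String)) :
    ids_to_tokens_alt (idx :: rest) itos =
      (let tok := PySem.Dict.getD (PySem.Dict.mk itos) idx "<unk>"
       if tok = "<eos>" then []
       else (if tok ≠ "<sos>" then [tok] else []) ++ ids_to_tokens_alt rest itos) := by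
  simp only [ids_to_tokens_alt, List.map_cons]
  exact cutfilter_cons _ _

theorem goA_eq (ids : List Int) (itos : List (Int × String)) (words : List String) :
    goA words ids itos = words ++ ids_to_tokens_alt ids itos := by
  induction ids generalizing words with
  | nil => simp [goA, alt_nil]
  | cons idx rest ih =>
    rw [goA, alt_cons]
    set tok := PySem.Dict.getD (PySem.Dict.mk itos) idx "<unk>"
    by_cases heos : tok = "<eos>"
    · simp [heos]
    · simp only [heos, if_false]
      rw [ih]
      by_cases hsos : tok = "<sos>" <;> simp [hsos]

-- ===== VERDICT (by name: the statement is the Claim_ definition above) =====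
theorem ids_to_tokens_spec : Claim_equal_ids_to_tokens := by
  intro ids itos _
  unfold Spec_ids_to_tokens ids_to_tokens
  rw [goA_eq, List.nil_append]
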